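-- pv_equiv track=rewrite | github.com/jeipollack/SlackGlossaryBot | SlackGlossaryBot/glossary/glossary.py | preprocess_glossary
-- ===== SOURCE A (Python) =====
-- def read_json_header(glossary_data):
--     """Read JSON Header.
--
--     Read the header of a JSON file.
--
--     Paramters
--     ---------
--     glossary_data: list
--         List of dictionaries representing data from a JSON file.
--
--     Returns
--     -------
--     headers: list
--         List of strings representing the header keys.
--     """
--
--     if glossary_data:  # Check if the JSON file is not empty
--         first_row = glossary_data[0]
--         headers = list(first_row.keys())
--     else:
--         headers = []  # If the JSON file is empty or has no data
--     return headers
--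
-- def preprocess_glossary(glossary_data):
--     """
--     Preprocess the glossary data by concatenating duplicate definitions.
--
--     Parameters
--     ----------
--     glossary_data: list of dict
--         List containing glossary data with possible duplicate acronyms.
--
--     Returns
--     -------
--     dict
--         Preprocessed glossary with concatenated definitions.
--     """
--     glossary = {}
--     header = read_json_header(glossary_data)
--     for item in glossary_data:
--         acronym = item[header[0]].lower()
--         definition = item[header[1]]
--         if acronym in glossary:
--             glossary[acronym].append(definition)
--         else:
--             glossary[acronym] = [definition]
--     return glossary
-- ===== SOURCE B (Python) =====
-- def read_json_header(glossary_data):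
--     """Return the keys of the first row, or [] if there is no data."""
--     return list(glossary_data[0].keys()) if glossary_data else []
--
--
-- def preprocess_glossary(glossary_data):
--     """Group definitions by lowercased acronym: extract all (acronym, definition)
--     pairs once, then build the result per distinct acronym (first-seen order)
--     by collecting every definition carrying that acronym."""
--     header = read_json_header(glossary_data)
--     pairs = [(item[header[0]].lower(), item[header[1]]) for item in glossary_data]
--     return {a: [d for x, d in pairs if x == a]
--             for a in dict.fromkeys(x for x, _ in pairs)}
-- ===== Notes on version B (the rewrite author's own statement) =====
-- stated objective: alternative
-- what changed: Replaces A's incremental dict build (conditional append-or-insert per item) with a two-phase pipeline: extract the flat (lowered acronym, definition) pair list once, then build the result per distinct first-seen acronym by filtering that list.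
import Mathlib
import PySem

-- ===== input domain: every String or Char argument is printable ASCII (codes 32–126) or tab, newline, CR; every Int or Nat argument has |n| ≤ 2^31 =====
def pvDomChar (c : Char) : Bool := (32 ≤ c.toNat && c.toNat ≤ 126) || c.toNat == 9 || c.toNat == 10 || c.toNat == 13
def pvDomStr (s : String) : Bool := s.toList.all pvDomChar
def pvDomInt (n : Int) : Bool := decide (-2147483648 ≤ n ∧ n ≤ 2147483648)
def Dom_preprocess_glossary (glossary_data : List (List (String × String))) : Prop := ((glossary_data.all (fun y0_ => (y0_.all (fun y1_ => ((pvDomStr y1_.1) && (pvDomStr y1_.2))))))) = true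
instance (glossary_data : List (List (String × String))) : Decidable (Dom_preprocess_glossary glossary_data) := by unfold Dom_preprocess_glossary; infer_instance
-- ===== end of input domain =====

-- B groups by building the flat (lowered acronym, definition) pair list once and then
-- producing, per distinct acronym in first-seen order, all its definitions by a filter —
-- instead of A's incremental conditional dict update (objective: alternative).

-- ===== PORT A =====
-- Each Python dict is a List (String × String); PySem.Dict.ofList builds it with
-- Python's dict semantics (insertion order, overwrite in place).
def read_json_header (glossary_data : List (List (String × String))) : List String :=
  match glossary_data with
  | [] => []
  | first_row :: _ => (PySem.Dict.ofList first_row).keys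

-- header[0]/header[1] (IndexError when the first row has < 2 keys) and item[...]
-- (KeyError when an item lacks a header key) are ported with total getD defaults;
-- exactly those raising inputs are excluded by Pre_ below.
def preprocess_glossary (glossary_data : List (List (String × String))) : List (String × List String) :=
  let header := read_json_header glossary_data
  let glossary : PySem.Dict String (List String) :=
    glossary_data.foldl (fun glossary item =>
      let acronym := PySem.Str.lower ((PySem.Dict.ofList item).getD (header.getD 0 "") "")
      let definition := (PySem.Dict.ofList item).getD (header.getD 1 "") ""
      if glossary.contains acronym then
        glossary.modify acronym [] (fun l => l ++ [definition])   -- glossary[acronym].append(definition)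
      else
        glossary.insert acronym [definition]) PySem.Dict.empty
  glossary.items

-- ===== PORT B =====
def preprocess_glossary_alt (glossary_data : List (List (String × String))) : List (String × List String) :=
  let header := read_json_header glossary_data
  let pairs : List (String × String) :=
    glossary_data.map (fun item =>
      (PySem.Str.lower ((PySem.Dict.ofList item).getD (header.getD 0 "") ""),
       (PySem.Dict.ofList item).getD (header.getD 1 "") ""))
  (PySem.List.dedup (pairs.map (·.1))).map
    (fun a => (a, (pairs.filter (fun x => x.1 == a)).map (·.2)))

-- ===== PRECONDITION & SPEC =====
-- Pre_ excludes exactly the inputs where Python A raises: a nonempty input whose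
-- first row has fewer than two keys (IndexError on header[0]/header[1]) or that has
-- an item missing one of the two header keys (KeyError).
def Pre_preprocess_glossary (glossary_data : List (List (String × String))) : Prop :=
  glossary_data = [] ∨
  (2 ≤ (PySem.Dict.ofList (glossary_data.headD [])).keys.length ∧
   ∀ item ∈ glossary_data,
     (PySem.Dict.ofList item).contains ((PySem.Dict.ofList (glossary_data.headD [])).keys.getD 0 "") = true ∧
     (PySem.Dict.ofList item).contains ((PySem.Dict.ofList (glossary_data.headD [])).keys.getD 1 "") = true)

instance (glossary_data : List (List (String × String))) : Decidable (Pre_preprocess_glossary glossary_data) := by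
  unfold Pre_preprocess_glossary; infer_instance

def pvWitness_preprocess_glossary : (List (List (String × String))) :=
  [[("Acronym", "NASA"), ("Definition", "space agency")],
   [("Acronym", "nasa"), ("Definition", "another one")]]

def Spec_preprocess_glossary (glossary_data : List (List (String × String))) (out : List (String × List String)) : Prop := out = preprocess_glossary_alt glossary_data
instance (glossary_data : List (List (String × String))) (out : List (String × List String)) : Decidable (Spec_preprocess_glossary glossary_data out) := by unfold Spec_preprocess_glossary; infer_instance

-- ===== CLAIM (what is proved, stated in full; the proofs are below) =====
def Claim_equal_preprocess_glossary : Prop := ∀ (glossary_data : List (List (String × String))), Dom_preprocess_glossary glossary_data → Pre_preprocess_glossary glossary_data → Spec_preprocess_glossary glossary_data (preprocess_glossary glossary_data)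

-- ===== LEMMAS AND PROOFS =====

-- A's branch (append if present, fresh singleton otherwise) is exactly Dict.modify.
theorem step_eq_modify (g : PySem.Dict String (List String)) (a v : String) :
    (if g.contains a then g.modify a [] (fun l => l ++ [v]) else g.insert a [v]) =
      g.modify a [] (fun l => l ++ [v]) := by
  by_cases h : g.contains a = true
  · simp [h]
  · rw [if_neg (by simp [h]), PySem.Dict.modify,
      PySem.Dict.getD_of_not_contains (d0 := ([] : List String)) g (by simp [h])]
    rfl

-- The two ports agree on every input (Pre_ is only needed for faithfulness to Python).
theorem ports_eq (glossary_data : List (List (String × String))) :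
    preprocess_glossary glossary_data = preprocess_glossary_alt glossary_data := by
  unfold preprocess_glossary preprocess_glossary_alt
  simp only [step_eq_modify]
  rw [← List.foldl_map
    (f := fun item =>
      (PySem.Str.lower ((PySem.Dict.ofList item).getD ((read_json_header glossary_data).getD 0 "") ""),
       (PySem.Dict.ofList item).getD ((read_json_header glossary_data).getD 1 "") ""))
    (g := fun (g : PySem.Dict String (List String)) (p : String × String) =>
      g.modify p.1 [] (fun l => l ++ [p.2]))]
  rw [PySem.Dict.items_eq_map_keys _
    (PySem.Dict.nodup_keys_foldl_modify_key _ _ _ _ _ (by simp)) []]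
  rw [PySem.Dict.keys_foldl_modify_key]
  simp only [PySem.Dict.getD_foldl_modify_append, PySem.Dict.getD_empty, List.nil_append,
    PySem.Dict.keys_empty, PySem.Set.update_nil_left, ← PySem.List.dedup_eq_ofList]

-- ===== VERDICT (by name: the statement is the Claim_ definition above) =====
theorem preprocess_glossary_spec : Claim_equal_preprocess_glossary := by
  intro gd _ _
  unfold Spec_preprocess_glossary
  exact ports_eq gd
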